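-- pv_equiv track=rewrite | github.com/LannCX/Flight-allocation-problem | lib/utils.py | distributeOfExcTime
-- ===== SOURCE A (Python) =====
-- def distributeOfExcTime(excTimeList):
--     totalDic = {}
--     m = int((max(excTimeList)/10))*10+5
--     for i in range(5,m,5):
--         #iList.append(i)
--         subs = str(i)
--         dics = {subs:0}
--         totalDic.update(dics)
--         dics.clear()
--     for times in excTimeList:
--         for keys in totalDic:
--             if int(times)<= int(keys):
--                 totalDic[keys] +=1
--     return sorted(totalDic.items(),key=lambda item:item[1])
-- ===== SOURCE B (Python) =====
-- def distributeOfExcTime(excTimeList):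
--     # Sort once, then walk the thresholds with a single advancing pointer:
--     # the count at each threshold is how far the pointer has moved, so the
--     # per-threshold scan and the final sort (counts are nondecreasing) both go.
--     m = int(max(excTimeList) / 10) * 10 + 5
--     times = sorted(excTimeList)
--     res = []
--     i = 0
--     for k in range(5, m, 5):
--         while i < len(times) and times[i] <= k:
--             i += 1
--         res.append((str(k), i))
--     return res
-- ===== Notes on version B (the rewrite author's own statement) =====
-- stated objective: faster
-- what changed: A rescans every dict key for every time and finally sorts by count; B sorts the times once and walks the thresholds with a single advancing pointer, whose position IS the count, so the inner scan and the final sort disappear. Pre_ excludes only the empty list, on which A raises ValueError (max of empty sequence).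
import Mathlib
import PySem

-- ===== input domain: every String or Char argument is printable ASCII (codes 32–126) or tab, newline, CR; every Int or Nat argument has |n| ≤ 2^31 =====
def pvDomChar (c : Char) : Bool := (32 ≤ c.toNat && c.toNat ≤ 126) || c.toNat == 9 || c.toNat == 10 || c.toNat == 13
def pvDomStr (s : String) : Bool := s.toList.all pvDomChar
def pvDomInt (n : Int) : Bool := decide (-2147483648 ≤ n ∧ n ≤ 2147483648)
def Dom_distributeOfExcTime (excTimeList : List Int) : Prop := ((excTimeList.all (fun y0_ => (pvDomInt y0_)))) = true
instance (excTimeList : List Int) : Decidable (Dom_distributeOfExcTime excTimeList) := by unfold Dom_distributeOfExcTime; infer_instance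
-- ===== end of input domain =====

-- B sorts the times once and walks the thresholds with a single advancing pointer
-- (whose position is the count), replacing A's per-time scan over every dict key
-- and A's final sort-by-count.

-- ===== PORT A =====
-- Hand-written port of Python's int(s) for the strings A applies it to (the dict keys,
-- which are exactly the canonical decimal strings str(i)): optional '-', then decimal
-- digits.  Exact on every such string: int(str(i)) = i.
def pvParseDigits (ds : List Char) (acc : Nat) : Nat :=
  ds.foldl (fun a c => 10 * a + (c.toNat - 48)) acc

def pvIntOfDecStr (s : String) : Int :=
  match s.toList with
  | '-' :: ds => -(pvParseDigits ds 0 : Int)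
  | ds => (pvParseDigits ds 0 : Int)

def distributeOfExcTime (excTimeList : List Int) : List (String × Int) :=
  match PySem.List.max? excTimeList (fun x => x) with
  | none => []  -- max([]) raises ValueError; excluded by Pre_
  | some mx =>
    -- int(max/10): float division then int() truncates toward zero; exact as integer
    -- truncating division for |max| ≤ 2^31 (the quotient is far below float precision loss)
    let m := PySem.Int.truncdiv mx 10 * 10 + 5
    let totalDic : PySem.Dict String Int :=
      (PySem.List.pyRange 5 m 5).foldl (fun d i => d.insert (PySem.Int.toStr i) 0) PySem.Dict.empty
    -- `totalDic[keys] += 1` on a key of the dict = modify-in-place with any default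
    let totalDic := excTimeList.foldl
      (fun d times => d.keys.foldl
        (fun d' keys => if times ≤ pvIntOfDecStr keys then d'.modify keys 0 (· + 1) else d') d)
      totalDic
    PySem.List.sorted totalDic.items (fun item => item.2) false

-- ===== PORT B =====
-- the `while i < len(times) and times[i] <= k: i += 1` loop of Source B;
-- the index read is guarded, so `times[i]` is `(times[i]?).getD 0` exactly
def pvAdv (ts : List Int) (k : Int) (i : Nat) : Nat :=
  if h : i < ts.length ∧ (ts[i]?).getD 0 ≤ k then pvAdv ts k (i + 1) else i
termination_by ts.length - i
decreasing_by omega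

def distributeOfExcTime_alt (excTimeList : List Int) : List (String × Int) :=
  match PySem.List.max? excTimeList (fun x => x) with
  | none => []  -- max([]) raises ValueError; excluded by Pre_
  | some mx =>
    -- int(max/10): float division then int() truncates toward zero; exact as integer
    -- truncating division for |max| ≤ 2^31
    let m := PySem.Int.truncdiv mx 10 * 10 + 5
    let times := PySem.List.sorted excTimeList (fun x => x) false
    let r := (PySem.List.pyRange 5 m 5).foldl
      (fun (p : List (String × Int) × Nat) k =>
        let i := pvAdv times k p.2
        (p.1 ++ [(PySem.Int.toStr k, (i : Int))], i)) ([], 0)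
    r.1

-- ===== PRECONDITION & SPEC =====
-- Pre_ excludes only the empty list, on which A raises ValueError (max of empty sequence).
def Pre_distributeOfExcTime (excTimeList : List Int) : Prop := excTimeList ≠ []
instance (excTimeList : List Int) : Decidable (Pre_distributeOfExcTime excTimeList) := by
  unfold Pre_distributeOfExcTime; infer_instance

def pvWitness_distributeOfExcTime : List Int := [17, 3, 12]

def Spec_distributeOfExcTime (excTimeList : List Int) (out : List (String × Int)) : Prop :=
  out = distributeOfExcTime_alt excTimeList
instance (excTimeList : List Int) (out : List (String × Int)) : Decidable (Spec_distributeOfExcTime excTimeList out) := by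
  unfold Spec_distributeOfExcTime; infer_instance

-- ===== CLAIM (what is proved, stated in full; the proofs are below) =====
def Claim_equal_distributeOfExcTime : Prop := ∀ (excTimeList : List Int), Dom_distributeOfExcTime excTimeList → Pre_distributeOfExcTime excTimeList → Spec_distributeOfExcTime excTimeList (distributeOfExcTime excTimeList)

-- ===== LEMMAS AND PROOFS =====

-- ---- the decimal round trip: pvIntOfDecStr (str n) = n ----
theorem pv_digitChar_toNat {d : Nat} (hd : d < 10) : (Nat.digitChar d).toNat - 48 = d := by
  interval_cases d <;> decide

theorem pv_parse_toDigits (a : Nat) :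
    ∀ acc, pvParseDigits (Nat.toDigits 10 a) acc = acc * 10 ^ (Nat.toDigits 10 a).length + a := by
  induction a using Nat.strong_induction_on with
  | _ a ih =>
    intro acc
    by_cases h : a < 10
    · rw [Nat.toDigits_of_lt_base h]
      simp [pvParseDigits, pv_digitChar_toNat h, Nat.mul_comm]
    · rw [Nat.toDigits_eq_if (by norm_num)]
      simp only [if_neg h]
      have hlt : a / 10 < a := Nat.div_lt_self (by omega) (by norm_num)
      have hmod : a % 10 < 10 := Nat.mod_lt _ (by norm_num)
      simp only [pvParseDigits, List.foldl_append, List.foldl_cons, List.foldl_nil,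
        List.length_append, List.length_cons, List.length_nil]
      have := ih (a / 10) hlt acc
      simp only [pvParseDigits] at this
      rw [this, pv_digitChar_toNat hmod, pow_succ]
      have := Nat.div_add_mod a 10
      ring_nf
      omega

theorem pv_round (n : Int) : pvIntOfDecStr (PySem.Int.toStr n) = n := by
  unfold pvIntOfDecStr
  rw [PySem.Int.toList_toStr]
  unfold PySem.Int.toChars
  by_cases hn : n < 0
  · simp only [if_pos hn]
    have := pv_parse_toDigits n.natAbs 0
    simp only [this, zero_mul, zero_add]
    omega
  · simp only [if_neg hn]
    obtain ⟨c, rest, hc⟩ : ∃ c rest, Nat.toDigits 10 n.toNat = c :: rest := by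
      cases h : Nat.toDigits 10 n.toNat with
      | nil => exact absurd h (by have := @Nat.length_toDigits_pos 10 n.toNat; intro hh; rw [hh] at this; simp at this)
      | cons c rest => exact ⟨c, rest, rfl⟩
    have hcd : c.isDigit = true :=
      Nat.isDigit_of_mem_toDigits (b:=10) (n:=n.toNat) (by norm_num) (by norm_num) (by rw [hc]; exact List.mem_cons_self)
    have hcne : c ≠ '-' := by
      intro h; rw [h] at hcd; exact absurd hcd (by decide)
    rw [hc]
    split
    · rename_i ds heq
      exact absurd (List.cons.injEq .. ▸ heq) (by simp [hcne])
    · have := pv_parse_toDigits n.toNat 0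
      rw [← hc, this]
      simp
      omega

theorem pv_toStr_inj : Function.Injective PySem.Int.toStr := by
  intro a b h
  have := pv_round a; rw [h, pv_round b] at this; omega

-- ---- the canonical value both programs compute ----
def pvCnt (xs : List Int) (k : Int) : Int := (xs.countP (fun t => decide (t ≤ k)) : Int)

def pvKeyList (m : Int) : List Int := PySem.List.pyRange 5 m 5

def pvCanon (xs : List Int) (m : Int) : List (String × Int) :=
  (pvKeyList m).map (fun k => (PySem.Int.toStr k, pvCnt xs k))

theorem pv_keyList_repr (m : Int) :
    pvKeyList m = (List.range (if (5:Int) < m then ((m - 1) / 5).toNat else 0)).map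
      (fun (k : Nat) => 5 + 5 * (k : Int)) := by
  unfold pvKeyList
  rw [PySem.List.pyRange_of_pos 5 m (by norm_num)]
  have : m - 5 + 5 - 1 = m - 1 := by ring
  rw [this]

theorem pv_keyList_pairwise (m : Int) : (pvKeyList m).Pairwise (· < ·) := by
  rw [pv_keyList_repr]
  exact List.Pairwise.map _ (fun a b h => by omega) List.pairwise_lt_range

theorem pv_keyList_nodup (m : Int) : (pvKeyList m).Nodup := by
  exact ((pv_keyList_pairwise m).imp (fun h => by omega)).nodup


-- ===== A-side =====

theorem pv_fmg (p : String → Prop) [DecidablePred p] (ss : List String) :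
    ∀ (d : PySem.Dict String Int) (s0 : String), ss.Nodup →
      (ss.foldl (fun d' s => if p s then d'.modify s 0 (· + 1) else d') d).getD s0 0
        = d.getD s0 0 + (if s0 ∈ ss ∧ p s0 then 1 else 0) := by
  induction ss with
  | nil => intro d s0 _; simp
  | cons s ss ih =>
    intro d s0 hnd
    have hnd' := List.nodup_cons.mp hnd
    rw [List.foldl_cons, ih _ s0 hnd'.2]
    by_cases hs : s0 = s
    · subst hs
      have : s0 ∉ ss := hnd'.1
      by_cases hp : p s0 <;> simp [hp, this]
    · by_cases hp : p s <;>
        simp [hp, hs, PySem.Dict.getD_modify]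

theorem pv_fold_keys (p : String → Prop) [DecidablePred p] (ss : List String) :
    ∀ (d : PySem.Dict String Int), (∀ s ∈ ss, d.contains s = true) →
      (ss.foldl (fun d' s => if p s then d'.modify s 0 (· + 1) else d') d).keys = d.keys := by
  induction ss with
  | nil => intro d _; simp
  | cons s ss ih =>
    intro d hc
    rw [List.foldl_cons]
    by_cases hp : p s
    · simp only [if_pos hp]
      have hck : d.contains s = true := hc s List.mem_cons_self
      have hkeys : (d.modify s 0 (· + 1)).keys = d.keys := by
        rw [PySem.Dict.keys_modify, PySem.Dict.keys_insert_of_contains _ _ hck]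
      rw [ih _ (fun s' hs' => by rw [PySem.Dict.contains_modify]; simp [hc s' (List.mem_cons_of_mem _ hs')]), hkeys]
    · simp only [if_neg hp]
      exact ih _ (fun s' hs' => hc s' (List.mem_cons_of_mem _ hs'))

theorem pv_inner (times : Int) (keysL : List Int) (c : Int → Int) (d : PySem.Dict String Int)
    (hnd : keysL.Nodup)
    (hd : d.items = keysL.map (fun k => (PySem.Int.toStr k, c k))) :
    (d.keys.foldl (fun d' s => if times ≤ pvIntOfDecStr s then d'.modify s 0 (· + 1) else d') d).items
      = keysL.map (fun k => (PySem.Int.toStr k, c k + if times ≤ k then 1 else 0)) := by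
  have hkeys : d.keys = keysL.map PySem.Int.toStr := by
    simp only [PySem.Dict.keys, hd, List.map_map]; rfl
  have hndk : d.keys.Nodup := by
    rw [hkeys]; exact hnd.map pv_toStr_inj
  have hkf : (d.keys.foldl (fun d' s => if times ≤ pvIntOfDecStr s then d'.modify s 0 (· + 1) else d') d).keys = d.keys :=
    pv_fold_keys (fun s => times ≤ pvIntOfDecStr s) d.keys d
      (fun s hs => (PySem.Dict.contains_iff_mem_keys _ _).mpr hs)
  have hndf := hkf ▸ hndk
  rw [PySem.Dict.items_eq_map_keys _ hndf 0, hkf, hkeys, List.map_map]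
  refine List.map_congr_left (fun k hk => ?_)
  have hmem : PySem.Int.toStr k ∈ d.keys := by rw [hkeys]; exact List.mem_map_of_mem hk
  have hbase : d.getD (PySem.Int.toStr k) 0 = c k :=
    PySem.Dict.getD_of_mem_items d (hd ▸ List.mem_map_of_mem hk) hndk 0
  have hfmg := pv_fmg (fun s => times ≤ pvIntOfDecStr s) d.keys d (PySem.Int.toStr k) hndk
  simp only [hkeys] at hfmg
  have hmem' : PySem.Int.toStr k ∈ keysL.map PySem.Int.toStr := List.mem_map_of_mem hk
  simp only [Function.comp_apply, hfmg, hbase, hmem', true_and, pv_round]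

theorem pv_countA (xs : List Int) (keysL : List Int) (hnd : keysL.Nodup) :
    ∀ (c : Int → Int) (d : PySem.Dict String Int),
      d.items = keysL.map (fun k => (PySem.Int.toStr k, c k)) →
      (xs.foldl (fun d times => d.keys.foldl
          (fun d' s => if times ≤ pvIntOfDecStr s then d'.modify s 0 (· + 1) else d') d) d).items
        = keysL.map (fun k => (PySem.Int.toStr k, c k + pvCnt xs k)) := by
  induction xs with
  | nil => intro c d hd; simpa [pvCnt] using hd
  | cons t xs ih =>
    intro c d hd
    rw [List.foldl_cons]
    rw [ih (fun k => c k + if t ≤ k then 1 else 0) _ (pv_inner t keysL c d hnd hd)]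
    refine List.map_congr_left (fun k _ => ?_)
    simp only [pvCnt, List.countP_cons, Prod.mk.injEq, true_and]
    by_cases h : t ≤ k <;> simp [h] <;> push_cast <;> ring

theorem pv_sorted_canon (xs : List Int) (m : Int) :
    PySem.List.sorted (pvCanon xs m) (fun item => item.2) false = pvCanon xs m := by
  apply PySem.List.sorted_eq_self_of_pairwise
  unfold pvCanon
  rw [List.pairwise_map]
  refine (pv_keyList_pairwise m).imp (fun {a b} hab => ?_)
  show pvCnt xs a ≤ pvCnt xs b
  unfold pvCnt
  have := List.countP_mono_left (l := xs) (p := fun t => decide (t ≤ a))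
    (q := fun t => decide (t ≤ b)) (fun x _ hx => by simp at hx ⊢; omega)
  exact_mod_cast this

theorem pv_A_canon (xs : List Int) (mx : Int)
    (hmx : PySem.List.max? xs (fun x => x) = some mx) :
    distributeOfExcTime xs = pvCanon xs (PySem.Int.truncdiv mx 10 * 10 + 5) := by
  unfold distributeOfExcTime
  rw [hmx]
  simp only []
  set m := PySem.Int.truncdiv mx 10 * 10 + 5 with hm
  have hbuild : ((PySem.List.pyRange 5 m 5).foldl (fun d i => d.insert (PySem.Int.toStr i) 0)
      (PySem.Dict.empty : PySem.Dict String Int)).items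
      = (pvKeyList m).map (fun k => (PySem.Int.toStr k, (0:Int))) := by
    have := PySem.Dict.items_foldl_insert_fresh (pvKeyList m) PySem.Int.toStr
      (fun _ => (0:Int)) (PySem.Dict.empty : PySem.Dict String Int)
      (fun a _ => PySem.Dict.contains_empty _) ((pv_keyList_nodup m).map pv_toStr_inj)
    simpa [pvKeyList] using this
  have hcount := pv_countA xs (pvKeyList m) (pv_keyList_nodup m) (fun _ => 0) _ hbuild
  rw [hcount]
  have : (pvKeyList m).map (fun k => (PySem.Int.toStr k, (fun (_ : Int) => (0:Int)) k + pvCnt xs k))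
      = pvCanon xs m := by
    unfold pvCanon
    exact List.map_congr_left (fun k _ => by simp)
  rw [this, pv_sorted_canon]

-- ===== B-side =====

-- length of a takeWhile prefix, characterised by its boundary
theorem pv_tw_eq (p : Int → Bool) :
    ∀ (ts : List Int) (i : Nat), i ≤ ts.length →
      (∀ j (hj : j < ts.length), j < i → p ts[j]) →
      (∀ (hi : i < ts.length), ¬ p ts[i]) →
      (ts.takeWhile p).length = i := by
  intro ts
  induction ts with
  | nil => intro i hi _ _; simp at hi ⊢; omega
  | cons a ts ih =>
    intro i hi h1 h2
    cases i with
    | zero =>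
      have : ¬ p a := h2 (by simp)
      simp [List.takeWhile_cons, this]
    | succ i =>
      have hpa : p a = true := h1 0 (by simp) (by omega)
      simp only [List.takeWhile_cons, hpa, if_true, List.length_cons]
      rw [ih i (by simpa using hi)
        (fun j hj hji => by simpa using h1 (j+1) (by simpa using hj) (by omega))
        (fun hh => by simpa using h2 (by simpa using hh))]

theorem pv_tw_le (p : Int → Bool) (ts : List Int) : (ts.takeWhile p).length ≤ ts.length :=
  (List.takeWhile_prefix p).sublist.length_le

theorem pv_tw_get (p : Int → Bool) (ts : List Int) (j : Nat)
    (hj : j < (ts.takeWhile p).length) :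
    p (ts[j]'(lt_of_lt_of_le hj (pv_tw_le p ts))) = true := by
  have h2 : p ((ts.takeWhile p)[j]) = true := List.mem_takeWhile_imp (List.getElem_mem hj)
  have h3 := (List.takeWhile_prefix (l := ts) p).getElem (i := j) hj
  rw [h3] at h2
  exact h2

-- on a sorted list, count ≤ k = length of the ≤ k prefix
theorem pv_tw_count (k : Int) :
    ∀ (ts : List Int), ts.Pairwise (· ≤ ·) →
      (ts.takeWhile (fun t => decide (t ≤ k))).length
        = ts.countP (fun t => decide (t ≤ k)) := by
  intro ts
  induction ts with
  | nil => simp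
  | cons a ts ih =>
    intro hp
    have hp' := List.pairwise_cons.mp hp
    by_cases ha : a ≤ k
    · simp [List.takeWhile_cons, List.countP_cons, ha, ih hp'.2]
    · have hz : ts.countP (fun t => decide (t ≤ k)) = 0 := by
        rw [List.countP_eq_zero]
        intro x hx
        have := hp'.1 x hx
        simp; omega
      simp [List.takeWhile_cons, List.countP_cons, ha, hz]

-- the while loop lands exactly at the end of the ≤ k prefix
theorem pv_adv_eq_fuel (ts : List Int) (k : Int) :
    ∀ (n i : Nat), ts.length - i ≤ n → i ≤ ts.length →
      (∀ j (hj : j < ts.length), j < i → ts[j] ≤ k) →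
      pvAdv ts k i = (ts.takeWhile (fun t => decide (t ≤ k))).length := by
  intro n
  induction n with
  | zero =>
    intro i hn hi h1
    have hieq : i = ts.length := by omega
    rw [pvAdv]
    rw [dif_neg (by omega)]
    exact (pv_tw_eq _ ts i hi (fun j hj hji => by simpa using h1 j hj hji)
      (fun hlt => absurd hlt (by omega))).symm
  | succ n ih =>
    intro i hn hi h1
    rw [pvAdv]
    by_cases h : i < ts.length ∧ (ts[i]?).getD 0 ≤ k
    · rw [dif_pos h]
      have hget : (ts[i]?).getD 0 = ts[i]'h.1 := by
        simp [List.getElem?_eq_getElem h.1]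
      refine ih (i + 1) (by omega) (by omega) (fun j hj hji => ?_)
      rcases Nat.lt_succ_iff_lt_or_eq.mp hji with hlt | heq
      · exact h1 j hj hlt
      · subst heq; rw [← hget]; exact h.2
    · rw [dif_neg h]
      refine (pv_tw_eq _ ts i hi (fun j hj hji => by simpa using h1 j hj hji)
        (fun hlt => ?_)).symm
      have : ¬ (ts[i]?).getD 0 ≤ k := fun hle => h ⟨hlt, hle⟩
      simp [List.getElem?_eq_getElem hlt] at this
      simpa using this

theorem pv_adv_eq (ts : List Int) (k : Int) :
    ∀ i, i ≤ ts.length → (∀ j (hj : j < ts.length), j < i → ts[j] ≤ k) →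
      pvAdv ts k i = (ts.takeWhile (fun t => decide (t ≤ k))).length :=
  fun i => pv_adv_eq_fuel ts k (ts.length - i) i (le_refl _)

-- the threshold loop: pointer position = count, for nondecreasing thresholds
theorem pv_loop (ts : List Int) (hs : ts.Pairwise (· ≤ ·)) :
    ∀ (ks : List Int), ks.Pairwise (· ≤ ·) →
      ∀ (i : Nat) (acc : List (String × Int)),
        i ≤ ts.length → (∀ k ∈ ks, ∀ j (hj : j < ts.length), j < i → ts[j] ≤ k) →
        (ks.foldl (fun (p : List (String × Int) × Nat) k =>
            let i' := pvAdv ts k p.2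
            (p.1 ++ [(PySem.Int.toStr k, (i' : Int))], i')) (acc, i)).1
          = acc ++ ks.map (fun k => (PySem.Int.toStr k, pvCnt ts k)) := by
  intro ks
  induction ks with
  | nil => intro _ i acc _ _; simp
  | cons k ks ih =>
    intro hks i acc hi hinv
    have hks' := List.pairwise_cons.mp hks
    rw [List.foldl_cons]
    simp only []
    have hadv : pvAdv ts k i = (ts.takeWhile (fun t => decide (t ≤ k))).length :=
      pv_adv_eq ts k i hi (fun j hj hji => hinv k List.mem_cons_self j hj hji)
    have hcnt : ((pvAdv ts k i : Nat) : Int) = pvCnt ts k := by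
      rw [hadv, pv_tw_count k ts hs]; rfl
    rw [ih hks'.2 (pvAdv ts k i) _ (by rw [hadv]; exact pv_tw_le _ ts) ?_]
    · simp [hcnt]
    · intro k' hk' j hj hji
      rw [hadv] at hji
      have hle : ts[j] ≤ k := by
        have := pv_tw_get (fun t => decide (t ≤ k)) ts j hji
        simpa using this
      exact le_trans hle (hks'.1 k' hk')

theorem pv_B_canon (xs : List Int) (mx : Int)
    (hmx : PySem.List.max? xs (fun x => x) = some mx) :
    distributeOfExcTime_alt xs = pvCanon xs (PySem.Int.truncdiv mx 10 * 10 + 5) := by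
  unfold distributeOfExcTime_alt
  rw [hmx]
  simp only []
  set m := PySem.Int.truncdiv mx 10 * 10 + 5 with hm
  set ts := PySem.List.sorted xs (fun x => x) false with hts
  have hsorted : ts.Pairwise (· ≤ ·) := PySem.List.sorted_pairwise xs (fun x => x)
  have hperm : ts.Perm xs := PySem.List.sorted_perm xs (fun x => x) false
  have hkeys : (pvKeyList m).Pairwise (· ≤ ·) :=
    (pv_keyList_pairwise m).imp le_of_lt
  have := pv_loop ts hsorted (pvKeyList m) hkeys 0 []
    (by omega) (fun _ _ j _ hj => absurd hj (by omega))
  rw [show PySem.List.pyRange 5 m 5 = pvKeyList m from rfl, this]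
  unfold pvCanon
  rw [List.nil_append]
  refine List.map_congr_left (fun k _ => ?_)
  have : pvCnt ts k = pvCnt xs k := by
    unfold pvCnt
    rw [hperm.countP_eq]
  rw [this]

-- ===== VERDICT (by name: the statement is the Claim_ definition above) =====
theorem distributeOfExcTime_spec : Claim_equal_distributeOfExcTime := by
  intro xs _ hpre
  unfold Spec_distributeOfExcTime
  obtain ⟨mx, hmx⟩ : ∃ mx, PySem.List.max? xs (fun x => x) = some mx := by
    cases h : PySem.List.max? xs (fun x => x) with
    | none => exact absurd ((PySem.List.max?_eq_none_iff xs _).mp h) hpre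
    | some mx => exact ⟨mx, rfl⟩
  rw [pv_A_canon xs mx hmx, pv_B_canon xs mx hmx]
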